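-- pv_equiv track=rewrite | github.com/chips-wq/everybody-codes | event2025/day10/part2.py | eat_sheep
-- ===== SOURCE A (Python) =====
-- def eat_sheep(dragon_positions: set[tuple[int, int]], board: list[list[str]], hideouts: set[tuple[int, int]]) -> int:
--     ans = 0
--     for i, line in enumerate(board):
--         for j, el in enumerate(line):
--             if (i, j) in hideouts: continue
--             if el == 'S' and (i, j) in dragon_positions:
--                 ans += 1
--                 board[i][j] = '.'
--     return ans
-- ===== SOURCE B (Python) =====
-- def eat_sheep(dragon_positions: set[tuple[int, int]], board: list[list[str]], hideouts: set[tuple[int, int]]) -> int: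
--     # 1) index pass: all sheep positions on the board
--     sheep = {(i, j) for i, row in enumerate(board) for j, el in enumerate(row) if el == 'S'}
--     # 2) set algebra: the cells actually eaten
--     eaten = (sheep & set(dragon_positions)) - set(hideouts)
--     # 3) erase pass
--     for i, j in eaten:
--         board[i][j] = '.'
--     return len(eaten)
-- ===== Notes on version B (the rewrite author's own statement) =====
-- stated objective: alternative
-- what changed: Replaces the single inline scan-with-counter by three phases: build the set of sheep positions, compute eaten = (sheep & dragon_positions) - hideouts by set algebra, then a separate erase pass returning len(eaten).
import Mathlib
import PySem

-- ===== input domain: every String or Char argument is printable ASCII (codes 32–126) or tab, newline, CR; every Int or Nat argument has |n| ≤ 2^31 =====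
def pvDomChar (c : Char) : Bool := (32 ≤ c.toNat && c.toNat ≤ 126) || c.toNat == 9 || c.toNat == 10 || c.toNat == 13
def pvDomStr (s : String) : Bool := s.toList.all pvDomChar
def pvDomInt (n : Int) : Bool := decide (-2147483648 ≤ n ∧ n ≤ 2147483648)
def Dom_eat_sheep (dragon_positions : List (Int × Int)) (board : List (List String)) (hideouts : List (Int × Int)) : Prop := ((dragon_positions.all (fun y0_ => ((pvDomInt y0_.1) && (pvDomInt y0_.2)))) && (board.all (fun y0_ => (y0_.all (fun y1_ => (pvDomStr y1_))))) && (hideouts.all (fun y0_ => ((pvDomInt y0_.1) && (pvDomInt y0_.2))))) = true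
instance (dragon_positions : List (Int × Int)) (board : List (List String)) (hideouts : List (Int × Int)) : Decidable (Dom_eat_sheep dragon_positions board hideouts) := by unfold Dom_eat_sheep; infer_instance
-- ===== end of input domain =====

-- B replaces A's inline scan-with-counter by build-sheep-index / set-algebra / separate erase pass (alternative decomposition);
-- equivalence proved is about the RETURN value (both Pythons also perform the same board mutation, not modelled here).


-- ===== PORT A =====
def eat_sheep (dragon_positions : List (Int × Int)) (board : List (List String)) (hideouts : List (Int × Int)) : Int :=
  (PySem.List.enumerate board).foldl (fun ans iline =>
    (PySem.List.enumerate iline.2).foldl (fun ans jel =>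
      if (iline.1, jel.1) ∈ hideouts then ans
      else if jel.2 = "S" ∧ (iline.1, jel.1) ∈ dragon_positions then ans + 1
      else ans) ans) 0

-- ===== PORT B =====
def eat_sheep_alt (dragon_positions : List (Int × Int)) (board : List (List String)) (hideouts : List (Int × Int)) : Int :=
  let sheep : PySem.Set (Int × Int) :=
    PySem.Set.ofList ((PySem.List.enumerate board).flatMap (fun iline =>
      ((PySem.List.enumerate iline.2).filter (fun jel => jel.2 == "S")).map (fun jel => (iline.1, jel.1))))
  let eaten : PySem.Set (Int × Int) :=
    PySem.Set.diff (PySem.Set.inter sheep (PySem.Set.ofList dragon_positions)) (PySem.Set.ofList hideouts)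
  PySem.Set.len eaten

-- ===== PRECONDITION & SPEC =====
def Spec_eat_sheep (dragon_positions : List (Int × Int)) (board : List (List String)) (hideouts : List (Int × Int)) (out : Int) : Prop := out = eat_sheep_alt dragon_positions board hideouts
instance (dragon_positions : List (Int × Int)) (board : List (List String)) (hideouts : List (Int × Int)) (out : Int) : Decidable (Spec_eat_sheep dragon_positions board hideouts out) := by unfold Spec_eat_sheep; infer_instance

-- ===== CLAIM (what is proved, stated in full; the proofs are below) =====
def Claim_equal_eat_sheep : Prop := ∀ (dragon_positions : List (Int × Int)) (board : List (List String)) (hideouts : List (Int × Int)), Dom_eat_sheep dragon_positions board hideouts → Spec_eat_sheep dragon_positions board hideouts (eat_sheep dragon_positions board hideouts)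

-- ===== LEMMAS AND PROOFS =====

-- the per-row sheep positions B builds
def pvRow (iline : Int × List String) : List (Int × Int) :=
  ((PySem.List.enumerate iline.2).filter (fun jel => jel.2 == "S")).map (fun jel => (iline.1, jel.1))

lemma pvRow_fst (iline : Int × List String) (x : Int × Int) (hx : x ∈ pvRow iline) : x.1 = iline.1 := by
  simp only [pvRow, List.mem_map] at hx
  obtain ⟨a, _, rfl⟩ := hx; rfl

lemma pvRow_nodup (iline : Int × List String) : (pvRow iline).Nodup := by
  have h1 : (PySem.List.enumerate iline.2).Pairwise (fun p q => p.1 < q.1) :=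
    PySem.List.pairwise_lt_enumerate _ _
  have h2 := h1.filter (p := fun jel => jel.2 == "S")
  unfold pvRow
  refine (List.pairwise_map).mpr (h2.imp ?_)
  intro a b hab he
  exact absurd (congrArg Prod.snd he) (ne_of_lt hab)

lemma pvSheep_nodup (board : List (List String)) (s : Int) :
    ((PySem.List.enumerate board s).flatMap pvRow).Nodup := by
  induction board generalizing s with
  | nil => simp [PySem.List.enumerate_nil]
  | cons line rest ih =>
    rw [PySem.List.enumerate_cons, List.flatMap_cons]
    refine (pvRow_nodup (s, line)).append (ih (s + 1)) ?_
    intro x hx hx'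
    have h1 : x.1 = s := pvRow_fst _ _ hx
    simp only [List.mem_flatMap] at hx'
    obtain ⟨iline, hmem, hxr⟩ := hx'
    have h2 : x.1 = iline.1 := pvRow_fst _ _ hxr
    rw [PySem.List.mem_enumerate_iff] at hmem
    obtain ⟨k, hk, rfl⟩ := hmem
    simp only at h2
    omega

lemma pv_length_filter_flatMap {α β : Type} (p : β → Bool) (f : α → List β) (L : List α) :
    ((L.flatMap f).filter p).length = (L.map (fun a => ((f a).filter p).length)).sum := by
  induction L with
  | nil => simp
  | cons a L ih => simp [List.flatMap_cons, List.filter_append, ih]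

lemma pv_sum_map_natCast {α : Type} (n : α → Nat) (L : List α) :
    (L.map (fun a => (n a : Int))).sum = ((L.map n).sum : Int) := by
  induction L with
  | nil => simp
  | cons a L ih => simp [ih]

-- per-row: B's filtered sheep count equals A's inner-loop count
lemma pv_row_count (dragon_positions hideouts : List (Int × Int)) (iline : Int × List String) :
    ((pvRow iline).filter (fun x =>
        !(PySem.Set.ofList hideouts).contains x && (PySem.Set.ofList dragon_positions).contains x)).length
    = (PySem.List.enumerate iline.2).countP (fun jel =>
        decide (¬ (iline.1, jel.1) ∈ hideouts ∧ (jel.2 = "S" ∧ (iline.1, jel.1) ∈ dragon_positions))) := by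
  unfold pvRow
  rw [List.filter_map, List.length_map, List.filter_filter, ← List.countP_eq_length_filter]
  refine List.countP_congr ?_
  intro jel _
  rw [Bool.eq_iff_iff]
  simp [PySem.Set.mem_ofList]
  tauto

-- ===== VERDICT (by name: the statement is the Claim_ definition above) =====
theorem eat_sheep_spec : Claim_equal_eat_sheep := by
  intro dragon_positions board hideouts _
  unfold Spec_eat_sheep eat_sheep eat_sheep_alt
  -- A side: turn the nested counting loops into a sum of per-row counts
  have hA : ∀ (L : List (Int × List String)),
      L.foldl (fun ans iline =>
        (PySem.List.enumerate iline.2).foldl (fun ans jel =>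
          if (iline.1, jel.1) ∈ hideouts then ans
          else if jel.2 = "S" ∧ (iline.1, jel.1) ∈ dragon_positions then ans + 1
          else ans) ans) 0
      = (L.map (fun iline => ((PySem.List.enumerate iline.2).countP (fun jel =>
          decide (¬ (iline.1, jel.1) ∈ hideouts ∧ (jel.2 = "S" ∧ (iline.1, jel.1) ∈ dragon_positions))) : Int))).sum := by
    intro L
    have hstep : ∀ (ans : Int) (iline : Int × List String), iline ∈ L →
        (PySem.List.enumerate iline.2).foldl (fun ans jel =>
          if (iline.1, jel.1) ∈ hideouts then ans
          else if jel.2 = "S" ∧ (iline.1, jel.1) ∈ dragon_positions then ans + 1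
          else ans) ans
        = ans + ((PySem.List.enumerate iline.2).countP (fun jel =>
            decide (¬ (iline.1, jel.1) ∈ hideouts ∧ (jel.2 = "S" ∧ (iline.1, jel.1) ∈ dragon_positions))) : Int) := by
      intro ans iline _
      rw [show (fun (ans : Int) (jel : Int × String) =>
          if (iline.1, jel.1) ∈ hideouts then ans
          else if jel.2 = "S" ∧ (iline.1, jel.1) ∈ dragon_positions then ans + 1
          else ans)
        = (fun (ans : Int) (jel : Int × String) =>
          if ¬ (iline.1, jel.1) ∈ hideouts ∧ (jel.2 = "S" ∧ (iline.1, jel.1) ∈ dragon_positions)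
          then ans + 1 else ans) from ?_]
      · exact PySem.List.foldl_ite_add_one _ _ _
      · funext ans jel
        by_cases h1 : (iline.1, jel.1) ∈ hideouts <;>
          by_cases h2 : jel.2 = "S" ∧ (iline.1, jel.1) ∈ dragon_positions <;>
          simp [h1, h2]
    rw [PySem.List.foldl_congr_mem (l := L) (init := (0 : Int)) (f := fun ans iline =>
      (PySem.List.enumerate iline.2).foldl (fun ans jel =>
        if (iline.1, jel.1) ∈ hideouts then ans
        else if jel.2 = "S" ∧ (iline.1, jel.1) ∈ dragon_positions then ans + 1
        else ans) ans) (g := fun ans iline =>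
      ans + ((PySem.List.enumerate iline.2).countP (fun jel =>
        decide (¬ (iline.1, jel.1) ∈ hideouts ∧ (jel.2 = "S" ∧ (iline.1, jel.1) ∈ dragon_positions))) : Int))
      (fun ans iline h => hstep ans iline h)]
    rw [PySem.List.foldl_add]
    simp
  rw [hA]
  -- B side
  simp only [PySem.Set.inter, PySem.Set.diff, PySem.Set.len, List.filter_filter]
  have hrw : (PySem.List.enumerate board).flatMap (fun iline =>
      ((PySem.List.enumerate iline.2).filter (fun jel => jel.2 == "S")).map (fun jel => (iline.1, jel.1)))
      = (PySem.List.enumerate board).flatMap pvRow := rfl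
  rw [hrw, PySem.Set.ofList_eq_self_of_nodup _ (pvSheep_nodup board 0),
    pv_length_filter_flatMap, ← pv_sum_map_natCast]
  congr 1
  refine List.map_congr_left ?_
  intro iline _
  rw [pv_row_count]
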